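-- pv_equiv track=rewrite | github.com/tyranich/python-project-lvl1 | brain_games/scripts/games/brain_gcd.py | chek_even
-- ===== SOURCE A (Python) =====
-- def chek_even(num_first, num_second, modul):
--     first_list = []
--     second_list = []
--     for _ in range(modul + 1):
--         if _ != 0:
--             a = num_first % _
--             b = num_second % _
--             if a == 0:
--                 first_list.append(_)
--             if b == 0:
--                 second_list.append(_)
--     return first_list, second_list
-- ===== SOURCE B (Python) =====
-- def _divisors_upto(num, modul):
--     """Sorted divisors d of num with 1 <= d <= modul, via trial division to sqrt(|num|)."""
--     if modul < 1:
--         return []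
--     if num == 0:
--         return list(range(1, modul + 1))
--     n = abs(num)
--     small = []
--     large = []
--     d = 1
--     while d * d <= n:
--         if n % d == 0:
--             if d <= modul:
--                 small.append(d)
--             q = n // d
--             if q != d and q <= modul:
--                 large.append(q)
--         d += 1
--     large.reverse()
--     return small + large
--
--
-- def chek_even(num_first, num_second, modul):
--     return _divisors_upto(num_first, modul), _divisors_upto(num_second, modul)
-- ===== Notes on version B (the rewrite author's own statement) =====
-- stated objective: faster
-- what changed: B enumerates divisors by trial division up to sqrt(|num|), collecting each small divisor d and its cofactor num//d (filtered by modul) and concatenating the two halves in order, instead of A's scan of every integer from 1 to modul.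
import Mathlib
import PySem

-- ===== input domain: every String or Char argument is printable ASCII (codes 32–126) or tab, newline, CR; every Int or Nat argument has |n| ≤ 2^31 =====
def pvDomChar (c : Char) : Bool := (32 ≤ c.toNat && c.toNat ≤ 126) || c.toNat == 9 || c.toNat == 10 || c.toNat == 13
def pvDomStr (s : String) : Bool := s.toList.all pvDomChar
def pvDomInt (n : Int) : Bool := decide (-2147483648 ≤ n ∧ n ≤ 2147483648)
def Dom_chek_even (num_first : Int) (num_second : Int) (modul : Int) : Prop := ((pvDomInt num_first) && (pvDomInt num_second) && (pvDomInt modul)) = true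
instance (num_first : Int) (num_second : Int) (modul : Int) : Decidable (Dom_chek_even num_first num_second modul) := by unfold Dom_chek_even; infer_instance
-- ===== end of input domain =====

-- B lists divisors via trial division up to sqrt(|num|) (small divisors plus their cofactors), instead of A's scan of 1..modul; objective: faster.


-- ===== PORT A =====
def chek_even (num_first : Int) (num_second : Int) (modul : Int) : List Int × List Int :=
  (PySem.List.pyRange 0 (modul + 1) 1).foldl
    (fun (st : List Int × List Int) d =>
      if d ≠ 0 then
        let a := PySem.Int.mod num_first d
        let b := PySem.Int.mod num_second d
        let st1 := if a = 0 then (st.1 ++ [d], st.2) else st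
        if b = 0 then (st1.1, st1.2 ++ [d]) else st1
      else st)
    ([], [])

-- ===== PORT B =====
-- trial-division loop of Source B: d runs while d*d ≤ n, collecting small divisors and large cofactors
def divisorsLoop (n m d : Int) (small large : List Int) : List Int :=
  if d * d ≤ n then
    if PySem.Int.mod n d = 0 then
      let small' := if d ≤ m then small ++ [d] else small
      let q := PySem.Int.floordiv n d
      let large' := if q ≠ d ∧ q ≤ m then large ++ [q] else large
      divisorsLoop n m (d + 1) small' large'
    else divisorsLoop n m (d + 1) small large
  else small ++ large.reverse
termination_by (n + 1 - d).toNat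
decreasing_by
  · have hdn : d ≤ n := by nlinarith
    omega
  · have hdn : d ≤ n := by nlinarith
    omega

def divisorsUpto (num : Int) (modul : Int) : List Int :=
  if modul < 1 then []
  else if num = 0 then PySem.List.pyRange 1 (modul + 1) 1
  else divisorsLoop |num| modul 1 [] []

def chek_even_alt (num_first : Int) (num_second : Int) (modul : Int) : List Int × List Int :=
  (divisorsUpto num_first modul, divisorsUpto num_second modul)

-- ===== PRECONDITION & SPEC =====
def Spec_chek_even (num_first : Int) (num_second : Int) (modul : Int) (out : List Int × List Int) : Prop := out = chek_even_alt num_first num_second modul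
instance (num_first : Int) (num_second : Int) (modul : Int) (out : List Int × List Int) : Decidable (Spec_chek_even num_first num_second modul out) := by unfold Spec_chek_even; infer_instance

-- ===== CLAIM (what is proved, stated in full; the proofs are below) =====
def Claim_equal_chek_even : Prop := ∀ (num_first : Int) (num_second : Int) (modul : Int), Dom_chek_even num_first num_second modul → Spec_chek_even num_first num_second modul (chek_even num_first num_second modul)

-- ===== LEMMAS AND PROOFS =====

-- the sorted list of divisors of n in [1, m] (the common value of both programs' components)
def divTarget (n m : Int) : List Int :=
  (PySem.List.pyRange 1 (m + 1) 1).filter (fun x => decide (PySem.Int.mod n x = 0))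

-- elements still to be produced by divisorsLoop from counter d on
def Rlist (n m d : Int) : List Int :=
  (PySem.List.pyRange 1 (m + 1) 1).filter
    (fun x => decide (PySem.Int.mod n x = 0 ∧ ((d ≤ x ∧ x * x ≤ n) ∨ (d * x ≤ n ∧ n < x * x))))

theorem Rlist_base (n m d : Int) (hd : 1 ≤ d) (hdd : n < d * d) : Rlist n m d = [] := by
  apply List.filter_eq_nil_iff.mpr
  intro x hx
  have hx1 : 1 ≤ x := (PySem.List.mem_pyRange_one.mp hx).1
  simp only [decide_eq_true_eq]
  rintro ⟨-, ⟨h1, h2⟩ | ⟨h1, h2⟩⟩ <;> nlinarith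

theorem Rlist_step_ndvd (n m d : Int) (hd : 1 ≤ d) (hndvd : ¬ d ∣ n) :
    Rlist n m d = Rlist n m (d + 1) := by
  apply List.filter_congr
  intro x hx
  have hx1 : 1 ≤ x := (PySem.List.mem_pyRange_one.mp hx).1
  apply decide_eq_decide.mpr
  constructor
  · rintro ⟨hmod, hcase⟩
    have hxdvd : x ∣ n := (PySem.Int.mod_eq_zero_iff_dvd n x).mp hmod
    refine ⟨hmod, ?_⟩
    rcases hcase with ⟨h1, h2⟩ | ⟨h1, h2⟩
    · left
      refine ⟨?_, h2⟩
      rcases lt_or_eq_of_le h1 with h | h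
      · omega
      · exact absurd (h ▸ hxdvd) hndvd
    · right
      refine ⟨?_, h2⟩
      by_contra hcon
      push Not at hcon
      obtain ⟨k, hk⟩ := hxdvd
      have hxpos : 0 < x := by omega
      have hdk : d ≤ k := by nlinarith
      have hkd : k < d + 1 := by nlinarith
      have : k = d := by omega
      exact hndvd ⟨x, by rw [hk, this, mul_comm]⟩
  · rintro ⟨hmod, hcase⟩
    refine ⟨hmod, ?_⟩
    rcases hcase with ⟨h1, h2⟩ | ⟨h1, h2⟩
    · exact Or.inl ⟨by omega, h2⟩
    · exact Or.inr ⟨by nlinarith, h2⟩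

-- membership-style facts about the filter predicate of Rlist
theorem P_mono (n d x : Int) (hx : 0 ≤ x) :
    (PySem.Int.mod n x = 0 ∧ ((d + 1 ≤ x ∧ x * x ≤ n) ∨ ((d + 1) * x ≤ n ∧ n < x * x))) →
    (PySem.Int.mod n x = 0 ∧ ((d ≤ x ∧ x * x ≤ n) ∨ (d * x ≤ n ∧ n < x * x))) := by
  rintro ⟨h, ⟨h1, h2⟩ | ⟨h1, h2⟩⟩
  · exact ⟨h, Or.inl ⟨by omega, h2⟩⟩
  · refine ⟨h, Or.inr ⟨by nlinarith, h2⟩⟩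

-- if x satisfies case 2 of P d but not of P (d+1), then x is the cofactor n / d
theorem P_cofactor (n d x : Int) (hx : 1 ≤ x) (hxdvd : x ∣ n)
    (h1 : d * x ≤ n) (hne : ¬ ((d + 1) * x ≤ n)) : n = x * d := by
  obtain ⟨k, hk⟩ := hxdvd
  have hdk : d ≤ k := by nlinarith
  have hkd : k < d + 1 := by nlinarith
  have : k = d := by omega
  rw [hk, this]

theorem Rlist_step (n m d : Int) (hn : 1 ≤ n) (hd : 1 ≤ d) (hdd : d * d ≤ n) (hdvd : d ∣ n) :
    Rlist n m d = (if d ≤ m then [d] else []) ++ Rlist n m (d + 1)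
      ++ (if PySem.Int.floordiv n d ≠ d ∧ PySem.Int.floordiv n d ≤ m
            then [PySem.Int.floordiv n d] else []) := by
  set q := PySem.Int.floordiv n d with hqdef
  have hq : n = d * q := by
    rw [hqdef, PySem.Int.floordiv_eq_ediv_of_pos (by omega : (0:Int) < d)]
    exact (Int.mul_ediv_cancel' hdvd).symm
  have hqd : d ≤ q := by nlinarith
  have hq1 : 1 ≤ q := by omega
  have hqdvd : q ∣ n := ⟨d, by rw [hq, mul_comm]⟩
  by_cases hm : d ≤ m
  case neg =>
    -- everything still to produce would be ≥ d > m, so all three pieces are empty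
    have hqif : (if q ≠ d ∧ q ≤ m then [q] else []) = [] := by
      rw [if_neg]; rintro ⟨hne, hle⟩; omega
    have e1 : Rlist n m d = [] := by
      apply List.filter_eq_nil_iff.mpr
      intro x hx
      have hx' := PySem.List.mem_pyRange_one.mp hx
      simp only [decide_eq_true_eq]
      rintro ⟨-, ⟨a1, a2⟩ | ⟨a1, a2⟩⟩ <;> nlinarith [hx'.1, hx'.2]
    have e2 : Rlist n m (d + 1) = [] := by
      apply List.filter_eq_nil_iff.mpr
      intro x hx
      have hx' := PySem.List.mem_pyRange_one.mp hx
      simp only [decide_eq_true_eq]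
      rintro ⟨-, ⟨a1, a2⟩ | ⟨a1, a2⟩⟩ <;> nlinarith [hx'.1, hx'.2]
    rw [if_neg hm, hqif, e1, e2]
    rfl
  case pos =>
    rw [if_pos hm]
    have hsplit : PySem.List.pyRange 1 (m + 1) 1
        = (PySem.List.pyRange 1 d 1 ++ [d]) ++ PySem.List.pyRange (d + 1) (m + 1) 1 := by
      rw [PySem.List.pyRange_one_append 1 (d + 1) (m + 1) (by omega) (by omega),
          PySem.List.pyRange_one_append 1 d (d + 1) (by omega) (by omega),
          PySem.List.pyRange_one_singleton]
    have f1 : ∀ e : Int, d ≤ e → List.filter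
        (fun x => decide (PySem.Int.mod n x = 0 ∧ ((e ≤ x ∧ x * x ≤ n) ∨ (e * x ≤ n ∧ n < x * x))))
        (PySem.List.pyRange 1 d 1) = [] := by
      intro e he
      apply List.filter_eq_nil_iff.mpr
      intro x hx
      have hx' := PySem.List.mem_pyRange_one.mp hx
      simp only [decide_eq_true_eq]
      rintro ⟨-, ⟨a1, a2⟩ | ⟨a1, a2⟩⟩ <;> nlinarith [hx'.1, hx'.2]
    have f2 : List.filter
        (fun x => decide (PySem.Int.mod n x = 0 ∧ ((d ≤ x ∧ x * x ≤ n) ∨ (d * x ≤ n ∧ n < x * x))))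
        [d] = [d] := by
      simp only [List.filter_cons, List.filter_nil, decide_eq_true_eq]
      rw [if_pos ⟨(PySem.Int.mod_eq_zero_iff_dvd n d).mpr hdvd, Or.inl ⟨le_refl d, hdd⟩⟩]
    have g2 : List.filter
        (fun x => decide (PySem.Int.mod n x = 0 ∧ ((d + 1 ≤ x ∧ x * x ≤ n) ∨ ((d + 1) * x ≤ n ∧ n < x * x))))
        [d] = [] := by
      simp only [List.filter_cons, List.filter_nil, decide_eq_true_eq]
      rw [if_neg]
      rintro ⟨-, ⟨a1, a2⟩ | ⟨a1, a2⟩⟩ <;> nlinarith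
    -- the main tail identity on pyRange (d+1) (m+1)
    have tail : List.filter
        (fun x => decide (PySem.Int.mod n x = 0 ∧ ((d ≤ x ∧ x * x ≤ n) ∨ (d * x ≤ n ∧ n < x * x))))
        (PySem.List.pyRange (d + 1) (m + 1) 1)
        = List.filter
        (fun x => decide (PySem.Int.mod n x = 0 ∧ ((d + 1 ≤ x ∧ x * x ≤ n) ∨ ((d + 1) * x ≤ n ∧ n < x * x))))
        (PySem.List.pyRange (d + 1) (m + 1) 1)
        ++ (if q ≠ d ∧ q ≤ m then [q] else []) := by
      by_cases hqc : q ≠ d ∧ q ≤ m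
      case pos =>
        obtain ⟨hqne, hqm⟩ := hqc
        have hdq : d + 1 ≤ q := by omega
        have hnq : n < q * q := by nlinarith
        have htsplit : PySem.List.pyRange (d + 1) (m + 1) 1
            = PySem.List.pyRange (d + 1) q 1 ++ (q :: PySem.List.pyRange (q + 1) (m + 1) 1) := by
          rw [PySem.List.pyRange_one_append (d + 1) q (m + 1) (by omega) (by omega),
              PySem.List.pyRange_one_cons (by omega : q < m + 1)]
        rw [htsplit]
        simp only [List.filter_append, List.filter_cons, decide_eq_true_eq]
        have t1 : List.filter
            (fun x => decide (PySem.Int.mod n x = 0 ∧ ((d ≤ x ∧ x * x ≤ n) ∨ (d * x ≤ n ∧ n < x * x))))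
            (PySem.List.pyRange (d + 1) q 1)
            = List.filter
            (fun x => decide (PySem.Int.mod n x = 0 ∧ ((d + 1 ≤ x ∧ x * x ≤ n) ∨ ((d + 1) * x ≤ n ∧ n < x * x))))
            (PySem.List.pyRange (d + 1) q 1) := by
          apply List.filter_congr
          intro x hx
          have hx' := PySem.List.mem_pyRange_one.mp hx
          apply decide_eq_decide.mpr
          constructor
          · rintro ⟨hmod, ⟨a1, a2⟩ | ⟨a1, a2⟩⟩
            · exact ⟨hmod, Or.inl ⟨hx'.1, a2⟩⟩
            · refine ⟨hmod, Or.inr ⟨?_, a2⟩⟩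
              by_contra hne
              have hx1 : 1 ≤ x := by omega
              have hxq : n = x * d :=
                P_cofactor n d x hx1 ((PySem.Int.mod_eq_zero_iff_dvd n x).mp hmod) a1 hne
              have : x = q := by
                have : d * x = d * q := by nlinarith
                exact mul_left_cancel₀ (by omega : d ≠ 0) this
              omega
          · exact P_mono n d x (by omega)
        have t2 : (PySem.Int.mod n q = 0 ∧ ((d ≤ q ∧ q * q ≤ n) ∨ (d * q ≤ n ∧ n < q * q))) := by
          exact ⟨(PySem.Int.mod_eq_zero_iff_dvd n q).mpr hqdvd, Or.inr ⟨by omega, hnq⟩⟩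
        have t3 : ¬ (PySem.Int.mod n q = 0 ∧ ((d + 1 ≤ q ∧ q * q ≤ n) ∨ ((d + 1) * q ≤ n ∧ n < q * q))) := by
          rintro ⟨-, ⟨a1, a2⟩ | ⟨a1, a2⟩⟩ <;> nlinarith
        have t4 : ∀ e : Int, d ≤ e → List.filter
            (fun x => decide (PySem.Int.mod n x = 0 ∧ ((e ≤ x ∧ x * x ≤ n) ∨ (e * x ≤ n ∧ n < x * x))))
            (PySem.List.pyRange (q + 1) (m + 1) 1) = [] := by
          intro e he
          apply List.filter_eq_nil_iff.mpr
          intro x hx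
          have hx' := PySem.List.mem_pyRange_one.mp hx
          simp only [decide_eq_true_eq]
          rintro ⟨hmod, ⟨a1, a2⟩ | ⟨a1, a2⟩⟩
          · nlinarith [hx'.1, hx'.2]
          · obtain ⟨k, hk⟩ := (PySem.Int.mod_eq_zero_iff_dvd n x).mp hmod
            have hxpos : (0:Int) < x := by omega
            have hdk : e ≤ k := by nlinarith
            nlinarith [hx'.1, hx'.2]
        rw [t1, if_pos t2, if_neg t3, t4 d (le_refl d), t4 (d + 1) (by omega)]
        rw [if_pos (⟨hqne, hqm⟩ : q ≠ d ∧ q ≤ m)]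
        simp
      case neg =>
        rw [if_neg hqc]
        rw [List.append_nil]
        apply List.filter_congr
        intro x hx
        have hx' := PySem.List.mem_pyRange_one.mp hx
        apply decide_eq_decide.mpr
        constructor
        · rintro ⟨hmod, ⟨a1, a2⟩ | ⟨a1, a2⟩⟩
          · exact ⟨hmod, Or.inl ⟨hx'.1, a2⟩⟩
          · refine ⟨hmod, Or.inr ⟨?_, a2⟩⟩
            by_contra hne
            have hx1 : 1 ≤ x := by omega
            have hxq : n = x * d :=
              P_cofactor n d x hx1 ((PySem.Int.mod_eq_zero_iff_dvd n x).mp hmod) a1 hne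
            have hxeq : x = q := by
              have : d * x = d * q := by nlinarith
              exact mul_left_cancel₀ (by omega : d ≠ 0) this
            exact hqc ⟨by omega, by omega⟩
        · exact P_mono n d x (by omega)
    unfold Rlist
    rw [hsplit]
    simp only [List.filter_append, f1 d (le_refl d), f1 (d + 1) (by omega), f2, g2, tail]
    simp

theorem loop_spec (n m : Int) (hn : 1 ≤ n) :
    ∀ d small large, 1 ≤ d →
      divisorsLoop n m d small large = small ++ Rlist n m d ++ large.reverse := by
  have key : ∀ k : Nat, ∀ d small large, (n + 1 - d).toNat = k → 1 ≤ d →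
      divisorsLoop n m d small large = small ++ Rlist n m d ++ large.reverse := by
    intro k
    induction k using Nat.strong_induction_on with
    | _ k ih =>
      intro d small large hk hd
      rw [divisorsLoop]
      by_cases h1 : d * d ≤ n
      · rw [if_pos h1]
        have hdn : d ≤ n := by nlinarith
        by_cases h2 : PySem.Int.mod n d = 0
        · rw [if_pos h2]
          have hdvd : d ∣ n := (PySem.Int.mod_eq_zero_iff_dvd n d).mp h2
          show divisorsLoop n m (d + 1)
              (if d ≤ m then small ++ [d] else small)
              (if PySem.Int.floordiv n d ≠ d ∧ PySem.Int.floordiv n d ≤ m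
                then large ++ [PySem.Int.floordiv n d] else large) = _
          rw [ih (n + 1 - (d + 1)).toNat (by omega) (d + 1) _ _ rfl (by omega),
              Rlist_step n m d hn hd h1 hdvd]
          split_ifs <;> simp
        · rw [if_neg h2]
          have hndvd : ¬ d ∣ n := fun h => h2 ((PySem.Int.mod_eq_zero_iff_dvd n d).mpr h)
          rw [ih (n + 1 - (d + 1)).toNat (by omega) (d + 1) _ _ rfl (by omega),
              Rlist_step_ndvd n m d hd hndvd]
      · rw [if_neg h1, Rlist_base n m d hd (by omega)]
        simp
  intro d small large hd
  exact key (n + 1 - d).toNat d small large rfl hd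

theorem Rlist_one (n m : Int) (hn : 1 ≤ n) : Rlist n m 1 = divTarget n m := by
  unfold Rlist divTarget
  apply List.filter_congr
  intro x hx
  have hx1 : 1 ≤ x := (PySem.List.mem_pyRange_one.mp hx).1
  apply decide_eq_decide.mpr
  constructor
  · rintro ⟨h, -⟩; exact h
  · intro h
    refine ⟨h, ?_⟩
    have hxdvd : x ∣ n := (PySem.Int.mod_eq_zero_iff_dvd n x).mp h
    have hxn : x ≤ n := Int.le_of_dvd (by omega) hxdvd
    rcases le_or_gt (x * x) n with hxx | hxx
    · exact Or.inl ⟨hx1, hxx⟩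
    · exact Or.inr ⟨by omega, hxx⟩

theorem divTarget_abs (num m : Int) : divTarget |num| m = divTarget num m := by
  unfold divTarget
  apply List.filter_congr
  intro x _
  apply decide_eq_decide.mpr
  rw [PySem.Int.mod_eq_zero_iff_dvd, PySem.Int.mod_eq_zero_iff_dvd]
  exact dvd_abs x num

theorem divisorsUpto_eq (num m : Int) : divisorsUpto num m = divTarget num m := by
  unfold divisorsUpto
  by_cases hm : m < 1
  · rw [if_pos hm]
    unfold divTarget
    rw [PySem.List.pyRange_one_eq_nil (by omega : m + 1 ≤ 1)]
    rfl
  · rw [if_neg hm]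
    by_cases h0 : num = 0
    · rw [if_pos h0, h0]
      symm
      apply List.filter_eq_self.mpr
      intro x _
      simp [PySem.Int.mod_eq_zero_iff_dvd]
    · rw [if_neg h0]
      have habs : 1 ≤ |num| := by
        rcases abs_pos.mpr h0 with h; omega
      rw [loop_spec |num| m habs 1 [] [] (by omega), Rlist_one |num| m habs, divTarget_abs]
      simp

-- the A-side filter over range(0, m+1) drops 0 and is divTarget on 1..m
def filterAux01 (x m : Int) : List Int :=
  (PySem.List.pyRange 0 (m + 1) 1).filter (fun d => decide (d ≠ 0 ∧ PySem.Int.mod x d = 0))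

theorem filter_zero_cons (x m : Int) : filterAux01 x m = divTarget x m := by
  unfold filterAux01 divTarget
  by_cases hm : 0 ≤ m
  · rw [PySem.List.pyRange_one_cons (by omega : (0:Int) < m + 1)]
    simp only [List.filter_cons]
    have h0 : (decide ((0:Int) ≠ 0 ∧ PySem.Int.mod x 0 = 0)) = false := by simp
    rw [h0]
    apply List.filter_congr
    intro d hd
    have hd1 : 1 ≤ d := (PySem.List.mem_pyRange_one.mp hd).1
    simp only [decide_eq_decide]
    constructor
    · rintro ⟨-, h⟩; exact h
    · intro h; exact ⟨by omega, h⟩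
  · push Not at hm
    rw [PySem.List.pyRange_one_eq_nil (by omega : m + 1 ≤ 0),
        PySem.List.pyRange_one_eq_nil (by omega : m + 1 ≤ 1)]
    rfl

theorem chek_even_eq (nf ns m : Int) :
    chek_even nf ns m = (divTarget nf m, divTarget ns m) := by
  have hbody : (fun (st : List Int × List Int) d =>
      if d ≠ 0 then
        let a := PySem.Int.mod nf d
        let b := PySem.Int.mod ns d
        let st1 := if a = 0 then (st.1 ++ [d], st.2) else st
        if b = 0 then (st1.1, st1.2 ++ [d]) else st1
      else st)
      = (fun (st : List Int × List Int) d =>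
        (if d ≠ 0 ∧ PySem.Int.mod nf d = 0 then st.1 ++ [d] else st.1,
         if d ≠ 0 ∧ PySem.Int.mod ns d = 0 then st.2 ++ [d] else st.2)) := by
    funext st d
    by_cases h0 : d = 0 <;> simp only [h0] <;> split_ifs <;> simp_all
  rw [chek_even, hbody,
    PySem.List.foldl_prod_mk
      (f := fun (acc : List Int) d => if d ≠ 0 ∧ PySem.Int.mod nf d = 0 then acc ++ [d] else acc)
      (g := fun (acc : List Int) d => if d ≠ 0 ∧ PySem.Int.mod ns d = 0 then acc ++ [d] else acc),
    PySem.List.foldl_append_ite_eq_filter, PySem.List.foldl_append_ite_eq_filter]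
  have h1 := filter_zero_cons nf m
  have h2 := filter_zero_cons ns m
  unfold filterAux01 at h1 h2
  simp only [List.nil_append, h1, h2]

-- ===== VERDICT (by name: the statement is the Claim_ definition above) =====
theorem chek_even_spec : Claim_equal_chek_even := by
  intro nf ns m _
  show chek_even nf ns m = chek_even_alt nf ns m
  rw [chek_even_eq, chek_even_alt, divisorsUpto_eq, divisorsUpto_eq]
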